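-- pv_equiv track=rewrite | github.com/imrankh46/mola-expert | mola_test.py | build_layerwise_allocation
-- ===== SOURCE A (Python) =====
-- from typing import Dict, List, Tuple
--
-- def build_layerwise_allocation(num_layers: int, groups: List[int]) -> Dict[int, int]:
--     assert len(groups) in (1, 2, 3, 4)
--     if len(groups) == 1:
--         return {i: groups[0] for i in range(num_layers)}
--     boundaries = []
--     if len(groups) == 4:
--         boundaries = [0, num_layers//4, num_layers//2, 3*num_layers//4, num_layers]
--     elif len(groups) == 3:
--         boundaries = [0, num_layers//3, 2*num_layers//3, num_layers]
--     else:  # 2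
--         boundaries = [0, num_layers//2, num_layers]
--
--     alloc = {}
--     for gi in range(len(groups)):
--         start, end = boundaries[gi], boundaries[gi+1]
--         for l in range(start, end):
--             alloc[l] = groups[gi]
--     return alloc
-- ===== SOURCE B (Python) =====
-- def build_layerwise_allocation(num_layers, groups):
--     assert len(groups) in (1, 2, 3, 4)
--     k = len(groups)
--     inner = [i * num_layers // k for i in range(1, k)]
--     return {l: groups[sum(1 for b in inner if b <= l)] for l in range(num_layers)}
-- ===== Notes on version B (the rewrite author's own statement) =====
-- stated objective: alternative
-- what changed: A fills the dict with nested loops (outer loop over groups, inner loop over that group's boundary segment); B makes a single pass over the layers and computes each layer's group index directly as the number of interior boundaries not exceeding it.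
import Mathlib
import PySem

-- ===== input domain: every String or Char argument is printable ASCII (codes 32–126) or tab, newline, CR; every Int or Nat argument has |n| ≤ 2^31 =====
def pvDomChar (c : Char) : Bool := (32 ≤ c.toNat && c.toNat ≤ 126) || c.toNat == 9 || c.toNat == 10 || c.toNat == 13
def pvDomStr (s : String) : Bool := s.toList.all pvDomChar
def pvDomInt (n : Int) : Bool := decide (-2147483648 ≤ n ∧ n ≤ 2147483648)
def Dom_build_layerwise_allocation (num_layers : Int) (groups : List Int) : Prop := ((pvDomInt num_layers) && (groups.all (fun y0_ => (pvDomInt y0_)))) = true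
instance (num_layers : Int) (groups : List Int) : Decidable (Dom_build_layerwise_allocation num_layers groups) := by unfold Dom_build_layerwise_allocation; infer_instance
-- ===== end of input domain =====

-- B replaces A's nested loops (per-group segment then per-layer) by a single pass over the layers that
-- computes each layer's group index from the boundary list directly (objective: alternative decomposition).

-- ===== PORT A =====
-- the leading 'assert len(groups) in (1, 2, 3, 4)' raises outside Pre_; it is dropped here
def build_layerwise_allocation (num_layers : Int) (groups : List Int) : List (Int × Int) :=
  if groups.length = 1 then
    ((PySem.List.pyRange 0 num_layers).foldl
      (fun d i => d.insert i (PySem.List.pyGetD groups 0 0)) PySem.Dict.empty).items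
  else
    let boundaries : List Int :=
      if groups.length = 4 then
        [0, PySem.Int.floordiv num_layers 4, PySem.Int.floordiv num_layers 2,
         PySem.Int.floordiv (3 * num_layers) 4, num_layers]
      else if groups.length = 3 then
        [0, PySem.Int.floordiv num_layers 3, PySem.Int.floordiv (2 * num_layers) 3, num_layers]
      else
        [0, PySem.Int.floordiv num_layers 2, num_layers]
    ((PySem.List.pyRange 0 (groups.length : Int)).foldl
      (fun d gi =>
        (PySem.List.pyRange (PySem.List.pyGetD boundaries gi 0)
            (PySem.List.pyGetD boundaries (gi + 1) 0)).foldl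
          (fun d l => d.insert l (PySem.List.pyGetD groups gi 0)) d)
      PySem.Dict.empty).items

-- ===== PORT B =====
-- the leading 'assert len(groups) in (1, 2, 3, 4)' raises outside Pre_; it is dropped here
def build_layerwise_allocation_alt (num_layers : Int) (groups : List Int) : List (Int × Int) :=
  let k : Int := (groups.length : Int)
  let inner : List Int := (PySem.List.pyRange 1 k).map (fun i => PySem.Int.floordiv (i * num_layers) k)
  ((PySem.List.pyRange 0 num_layers).foldl
    (fun d l => d.insert l (PySem.List.pyGetD groups
        ((inner.map (fun b => if b ≤ l then (1:Int) else 0)).sum) 0))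
    PySem.Dict.empty).items

-- ===== PRECONDITION & SPEC =====
-- Pre_ excludes exactly the inputs where A's assert raises (len(groups) not in (1,2,3,4))
def Pre_build_layerwise_allocation (num_layers : Int) (groups : List Int) : Prop :=
  groups.length = 1 ∨ groups.length = 2 ∨ groups.length = 3 ∨ groups.length = 4
instance (num_layers : Int) (groups : List Int) : Decidable (Pre_build_layerwise_allocation num_layers groups) := by unfold Pre_build_layerwise_allocation; infer_instance
def pvWitness_build_layerwise_allocation : Int × List Int := (7, [10, 20, 30])

def Spec_build_layerwise_allocation (num_layers : Int) (groups : List Int) (out : List (Int × Int)) : Prop := out = build_layerwise_allocation_alt num_layers groups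
instance (num_layers : Int) (groups : List Int) (out : List (Int × Int)) : Decidable (Spec_build_layerwise_allocation num_layers groups out) := by unfold Spec_build_layerwise_allocation; infer_instance

-- ===== CLAIM (what is proved, stated in full; the proofs are below) =====
def Claim_equal_build_layerwise_allocation : Prop := ∀ (num_layers : Int) (groups : List Int), Dom_build_layerwise_allocation num_layers groups → Pre_build_layerwise_allocation num_layers groups → Spec_build_layerwise_allocation num_layers groups (build_layerwise_allocation num_layers groups)

-- ===== LEMMAS AND PROOFS =====

-- a constant-value insertion loop over a range of fresh keys appends its pairs
theorem seg_items (s e c : Int) (d : PySem.Dict Int Int)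
    (hd : ∀ a ∈ PySem.List.pyRange s e, d.contains a = false) :
    ((PySem.List.pyRange s e).foldl (fun d l => d.insert l c) d).items
      = d.items ++ (PySem.List.pyRange s e).map (fun l => (l, c)) := by
  have h := PySem.Dict.items_foldl_insert_fresh (PySem.List.pyRange s e)
      (fun a => a) (fun _ => c) d hd
      (by simpa using PySem.List.nodup_pyRange_one s e)
  simpa using h

-- B's single insertion loop from the empty dict is the map of its pairs
theorem map_items (n : Int) (V : Int → Int) :
    ((PySem.List.pyRange 0 n).foldl (fun d l => d.insert l (V l)) PySem.Dict.empty).items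
      = (PySem.List.pyRange 0 n).map (fun l => (l, V l)) := by
  have h := PySem.Dict.items_foldl_insert_fresh (PySem.List.pyRange 0 n)
      (fun a => a) V PySem.Dict.empty (by simp)
      (by simpa using PySem.List.nodup_pyRange_one 0 n)
  simpa using h

-- a key absent from all first components of a dict's items is not contained
theorem contains_false_of_items (d : PySem.Dict Int Int) (ps : List (Int × Int))
    (hitems : d.items = ps) (a : Int) (ha : ∀ p ∈ ps, p.1 ≠ a) :
    d.contains a = false := by
  rw [PySem.Dict.contains_eq_decide_mem_keys]
  simp only [PySem.Dict.keys, hitems, decide_eq_false_iff_not, List.mem_map]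
  rintro ⟨p, hp, hfp⟩
  exact ha p hp hfp

theorem case1 (n g0 : Int) :
    build_layerwise_allocation n [g0] = build_layerwise_allocation_alt n [g0] := by
  unfold build_layerwise_allocation build_layerwise_allocation_alt
  simp only [show ([g0]:List Int).length = 1 from rfl, Nat.cast_one,
    show PySem.List.pyRange 1 (1:Int) = [] from by decide, List.map_nil, List.sum_nil,
    if_true, eq_self_iff_true]

theorem case2 (n g0 g1 : Int) :
    build_layerwise_allocation n [g0, g1] = build_layerwise_allocation_alt n [g0, g1] := by
  unfold build_layerwise_allocation build_layerwise_allocation_alt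
  have hb : PySem.Int.floordiv n 2 = n / 2 := PySem.Int.floordiv_eq_ediv_of_pos (by norm_num)
  simp only [show ([g0,g1]:List Int).length = 2 from rfl, Nat.cast_ofNat, hb,
    show PySem.List.pyRange 0 (2:Int) = [0,1] from by decide,
    show PySem.List.pyRange 1 (2:Int) = [1] from by decide,
    List.foldl_cons, List.foldl_nil, List.map_cons, List.map_nil,
    List.sum_cons, List.sum_nil, one_mul, add_zero]
  norm_num
  simp only [show PySem.List.pyGetD [(0:Int), n/2, n] 0 0 = 0 from rfl,
    show PySem.List.pyGetD [(0:Int), n/2, n] (0+1) 0 = n/2 from rfl,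
    show PySem.List.pyGetD [(0:Int), n/2, n] 1 0 = n/2 from rfl,
    show PySem.List.pyGetD [(0:Int), n/2, n] (1+1) 0 = n from rfl,
    show PySem.List.pyGetD [(0:Int), n/2, n] 2 0 = n from rfl,
    show PySem.List.pyGetD [g0,g1] 0 0 = g0 from rfl,
    show PySem.List.pyGetD [g0,g1] 1 0 = g1 from rfl]
  have h0 : ((PySem.List.pyRange 0 (n/2)).foldl
      (fun d i => d.insert i g0) PySem.Dict.empty).items
      = (PySem.List.pyRange 0 (n/2)).map (fun l => (l, g0)) := by
    simpa using seg_items 0 (n/2) g0 PySem.Dict.empty (by simp)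
  have h1 := seg_items (n/2) n g1 _
    (fun a ha => contains_false_of_items _ _ h0 a
      (by
        intro p hp
        rw [PySem.List.mem_pyRange_one] at ha
        simp only [List.mem_map, PySem.List.mem_pyRange_one] at hp
        obtain ⟨x, hx, rfl⟩ := hp
        simp only
        omega))
  rw [h1, h0, map_items n (fun l => PySem.List.pyGetD [g0,g1] (if n/2 ≤ l then (1:Int) else 0) 0)]
  by_cases hn : n ≤ 0
  · rw [PySem.List.pyRange_one_eq_nil (show (n:Int)/2 ≤ 0 by omega),
      PySem.List.pyRange_one_eq_nil (show n ≤ (n:Int)/2 by omega),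
      PySem.List.pyRange_one_eq_nil hn]
    simp
  · rw [PySem.List.pyRange_one_append 0 (n/2) n (by omega) (by omega), List.map_append]
    congr 1
    · refine List.map_congr_left (fun x hx => ?_)
      rw [PySem.List.mem_pyRange_one] at hx
      rw [if_neg (by omega)]
      rfl
    · refine List.map_congr_left (fun x hx => ?_)
      rw [PySem.List.mem_pyRange_one] at hx
      rw [if_pos (by omega)]
      rfl

theorem case3 (n g0 g1 g2 : Int) :
    build_layerwise_allocation n [g0, g1, g2] = build_layerwise_allocation_alt n [g0, g1, g2] := by
  unfold build_layerwise_allocation build_layerwise_allocation_alt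
  have hb : PySem.Int.floordiv n 3 = n / 3 := PySem.Int.floordiv_eq_ediv_of_pos (by norm_num)
  have hb2 : PySem.Int.floordiv (2*n) 3 = 2*n / 3 := PySem.Int.floordiv_eq_ediv_of_pos (by norm_num)
  simp only [show ([g0,g1,g2]:List Int).length = 3 from rfl, Nat.cast_ofNat, hb, hb2,
    show PySem.List.pyRange 0 (3:Int) = [0,1,2] from by decide,
    show PySem.List.pyRange 1 (3:Int) = [1,2] from by decide,
    List.foldl_cons, List.foldl_nil, List.map_cons, List.map_nil,
    List.sum_cons, List.sum_nil, one_mul, add_zero]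
  norm_num
  simp only [show PySem.List.pyGetD [(0:Int), n/3, 2*n/3, n] 0 0 = 0 from rfl,
    show PySem.List.pyGetD [(0:Int), n/3, 2*n/3, n] (0+1) 0 = n/3 from rfl,
    show PySem.List.pyGetD [(0:Int), n/3, 2*n/3, n] 1 0 = n/3 from rfl,
    show PySem.List.pyGetD [(0:Int), n/3, 2*n/3, n] (1+1) 0 = 2*n/3 from rfl,
    show PySem.List.pyGetD [(0:Int), n/3, 2*n/3, n] 2 0 = 2*n/3 from rfl,
    show PySem.List.pyGetD [(0:Int), n/3, 2*n/3, n] (2+1) 0 = n from rfl,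
    show PySem.List.pyGetD [(0:Int), n/3, 2*n/3, n] 3 0 = n from rfl,
    show PySem.List.pyGetD [g0,g1,g2] 0 0 = g0 from rfl,
    show PySem.List.pyGetD [g0,g1,g2] 1 0 = g1 from rfl,
    show PySem.List.pyGetD [g0,g1,g2] 2 0 = g2 from rfl]
  have h0 : ((PySem.List.pyRange 0 (n/3)).foldl
      (fun d i => d.insert i g0) PySem.Dict.empty).items
      = (PySem.List.pyRange 0 (n/3)).map (fun l => (l, g0)) := by
    simpa using seg_items 0 (n/3) g0 PySem.Dict.empty (by simp)
  have h1 := seg_items (n/3) (2*n/3) g1 _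
    (fun a ha => contains_false_of_items _ _ h0 a
      (by
        intro p hp
        rw [PySem.List.mem_pyRange_one] at ha
        simp only [List.mem_map, PySem.List.mem_pyRange_one] at hp
        obtain ⟨x, hx, rfl⟩ := hp
        simp only
        omega))
  rw [h0] at h1
  have h2 := seg_items (2*n/3) n g2 _
    (fun a ha => contains_false_of_items _ _ h1 a
      (by
        intro p hp
        rw [PySem.List.mem_pyRange_one] at ha
        simp only [List.mem_append, List.mem_map, PySem.List.mem_pyRange_one] at hp
        rcases hp with ⟨x, hx, rfl⟩ | ⟨x, hx, rfl⟩ <;> (simp only; omega)))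
  rw [h2, h1, map_items n (fun l => PySem.List.pyGetD [g0,g1,g2]
      ((if n/3 ≤ l then (1:Int) else 0) + if 2*n/3 ≤ l then (1:Int) else 0) 0)]
  by_cases hn : n ≤ 0
  · rw [PySem.List.pyRange_one_eq_nil (show (n:Int)/3 ≤ 0 by omega),
      PySem.List.pyRange_one_eq_nil (show 2*n/3 ≤ (n:Int)/3 by omega),
      PySem.List.pyRange_one_eq_nil (show n ≤ 2*(n:Int)/3 by omega),
      PySem.List.pyRange_one_eq_nil hn]
    simp
  · rw [PySem.List.pyRange_one_append 0 (n/3) n (by omega) (by omega),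
      PySem.List.pyRange_one_append (n/3) (2*n/3) n (by omega) (by omega),
      List.map_append, List.map_append, ← List.append_assoc]
    congr 1
    congr 1
    · refine List.map_congr_left (fun x hx => ?_)
      rw [PySem.List.mem_pyRange_one] at hx
      rw [if_neg (by omega), if_neg (by omega)]
      norm_num
    · refine List.map_congr_left (fun x hx => ?_)
      rw [PySem.List.mem_pyRange_one] at hx
      rw [if_pos (by omega), if_neg (by omega)]
      norm_num
      rfl
    · refine List.map_congr_left (fun x hx => ?_)
      rw [PySem.List.mem_pyRange_one] at hx
      rw [if_pos (by omega), if_pos (by omega)]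
      norm_num
      rfl

theorem case4 (n g0 g1 g2 g3 : Int) :
    build_layerwise_allocation n [g0, g1, g2, g3] = build_layerwise_allocation_alt n [g0, g1, g2, g3] := by
  unfold build_layerwise_allocation build_layerwise_allocation_alt
  have hb : PySem.Int.floordiv n 4 = n / 4 := PySem.Int.floordiv_eq_ediv_of_pos (by norm_num)
  have hb2 : PySem.Int.floordiv n 2 = n / 2 := PySem.Int.floordiv_eq_ediv_of_pos (by norm_num)
  have hb3 : PySem.Int.floordiv (3*n) 4 = 3*n / 4 := PySem.Int.floordiv_eq_ediv_of_pos (by norm_num)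
  have hb24 : PySem.Int.floordiv (2*n) 4 = n / 2 := by
    rw [PySem.Int.floordiv_eq_ediv_of_pos (by norm_num)]; omega
  simp only [show ([g0,g1,g2,g3]:List Int).length = 4 from rfl, Nat.cast_ofNat, hb, hb2, hb3, hb24,
    show PySem.List.pyRange 0 (4:Int) = [0,1,2,3] from by decide,
    show PySem.List.pyRange 1 (4:Int) = [1,2,3] from by decide,
    List.foldl_cons, List.foldl_nil, List.map_cons, List.map_nil,
    List.sum_cons, List.sum_nil, one_mul, add_zero]
  norm_num
  simp only [show PySem.List.pyGetD [(0:Int), n/4, n/2, 3*n/4, n] 0 0 = 0 from rfl,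
    show PySem.List.pyGetD [(0:Int), n/4, n/2, 3*n/4, n] (0+1) 0 = n/4 from rfl,
    show PySem.List.pyGetD [(0:Int), n/4, n/2, 3*n/4, n] 1 0 = n/4 from rfl,
    show PySem.List.pyGetD [(0:Int), n/4, n/2, 3*n/4, n] (1+1) 0 = n/2 from rfl,
    show PySem.List.pyGetD [(0:Int), n/4, n/2, 3*n/4, n] 2 0 = n/2 from rfl,
    show PySem.List.pyGetD [(0:Int), n/4, n/2, 3*n/4, n] (2+1) 0 = 3*n/4 from rfl,
    show PySem.List.pyGetD [(0:Int), n/4, n/2, 3*n/4, n] 3 0 = 3*n/4 from rfl,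
    show PySem.List.pyGetD [(0:Int), n/4, n/2, 3*n/4, n] (3+1) 0 = n from rfl,
    show PySem.List.pyGetD [(0:Int), n/4, n/2, 3*n/4, n] 4 0 = n from rfl,
    show PySem.List.pyGetD [g0,g1,g2,g3] 0 0 = g0 from rfl,
    show PySem.List.pyGetD [g0,g1,g2,g3] 1 0 = g1 from rfl,
    show PySem.List.pyGetD [g0,g1,g2,g3] 2 0 = g2 from rfl,
    show PySem.List.pyGetD [g0,g1,g2,g3] 3 0 = g3 from rfl]
  have h0 : ((PySem.List.pyRange 0 (n/4)).foldl
      (fun d i => d.insert i g0) PySem.Dict.empty).items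
      = (PySem.List.pyRange 0 (n/4)).map (fun l => (l, g0)) := by
    simpa using seg_items 0 (n/4) g0 PySem.Dict.empty (by simp)
  have h1 := seg_items (n/4) (n/2) g1 _
    (fun a ha => contains_false_of_items _ _ h0 a
      (by
        intro p hp
        rw [PySem.List.mem_pyRange_one] at ha
        simp only [List.mem_map, PySem.List.mem_pyRange_one] at hp
        obtain ⟨x, hx, rfl⟩ := hp
        simp only
        omega))
  rw [h0] at h1
  have h2 := seg_items (n/2) (3*n/4) g2 _
    (fun a ha => contains_false_of_items _ _ h1 a
      (by
        intro p hp
        rw [PySem.List.mem_pyRange_one] at ha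
        simp only [List.mem_append, List.mem_map, PySem.List.mem_pyRange_one] at hp
        rcases hp with ⟨x, hx, rfl⟩ | ⟨x, hx, rfl⟩ <;> (simp only; omega)))
  rw [h1] at h2
  have h3 := seg_items (3*n/4) n g3 _
    (fun a ha => contains_false_of_items _ _ h2 a
      (by
        intro p hp
        rw [PySem.List.mem_pyRange_one] at ha
        simp only [List.mem_append, List.mem_map, PySem.List.mem_pyRange_one] at hp
        rcases hp with (⟨x, hx, rfl⟩ | ⟨x, hx, rfl⟩) | ⟨x, hx, rfl⟩ <;> (simp only; omega)))
  rw [h3, h2, map_items n (fun l => PySem.List.pyGetD [g0,g1,g2,g3]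
      ((if n/4 ≤ l then (1:Int) else 0) + ((if n/2 ≤ l then (1:Int) else 0) + if 3*n/4 ≤ l then (1:Int) else 0)) 0)]
  by_cases hn : n ≤ 0
  · rw [PySem.List.pyRange_one_eq_nil (show (n:Int)/4 ≤ 0 by omega),
      PySem.List.pyRange_one_eq_nil (show (n:Int)/2 ≤ (n:Int)/4 by omega),
      PySem.List.pyRange_one_eq_nil (show 3*n/4 ≤ (n:Int)/2 by omega),
      PySem.List.pyRange_one_eq_nil (show n ≤ 3*(n:Int)/4 by omega),
      PySem.List.pyRange_one_eq_nil hn]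
    simp
  · rw [PySem.List.pyRange_one_append 0 (n/4) n (by omega) (by omega),
      PySem.List.pyRange_one_append (n/4) (n/2) n (by omega) (by omega),
      PySem.List.pyRange_one_append (n/2) (3*n/4) n (by omega) (by omega),
      List.map_append, List.map_append, List.map_append,
      ← List.append_assoc, ← List.append_assoc]
    congr 1
    congr 1
    congr 1
    · refine List.map_congr_left (fun x hx => ?_)
      rw [PySem.List.mem_pyRange_one] at hx
      rw [if_neg (by omega), if_neg (by omega), if_neg (by omega)]
      norm_num
    · refine List.map_congr_left (fun x hx => ?_)
      rw [PySem.List.mem_pyRange_one] at hx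
      rw [if_pos (by omega), if_neg (by omega), if_neg (by omega)]
      norm_num
      rfl
    · refine List.map_congr_left (fun x hx => ?_)
      rw [PySem.List.mem_pyRange_one] at hx
      rw [if_pos (by omega), if_pos (by omega), if_neg (by omega)]
      norm_num
      rfl
    · refine List.map_congr_left (fun x hx => ?_)
      rw [PySem.List.mem_pyRange_one] at hx
      rw [if_pos (by omega), if_pos (by omega), if_pos (by omega)]
      norm_num
      rfl

-- ===== VERDICT (by name: the statement is the Claim_ definition above) =====
theorem build_layerwise_allocation_spec : Claim_equal_build_layerwise_allocation := by
  intro n groups _ hpre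
  unfold Spec_build_layerwise_allocation
  rcases groups with _ | ⟨g0, _ | ⟨g1, _ | ⟨g2, _ | ⟨g3, _ | ⟨g4, t⟩⟩⟩⟩⟩
  · exfalso; unfold Pre_build_layerwise_allocation at hpre; simp at hpre
  · exact case1 n g0
  · exact case2 n g0 g1
  · exact case3 n g0 g1 g2
  · exact case4 n g0 g1 g2 g3
  · exfalso; unfold Pre_build_layerwise_allocation at hpre
    simp only [List.length_cons] at hpre; omega
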